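-- pv_equiv track=rewrite | github.com/pdr-tuche/fibonacci | fibonacci-recursivo.py | create_fibonacci_list
-- ===== SOURCE A (Python) =====
-- def fibonacci(number: int):
--     if number == 0:
--         return 0
--     elif number == 1:
--         return 1
--     else:
--         return fibonacci(number-1) + fibonacci(number-2)
--
-- def create_fibonacci_list(number: int):
--     fib_list = [0, 1]
--     for i in range(2, number):
--         num = fibonacci(i)
--         fib_list.append(fibonacci(i))
--         if num >= number:
--             break
--     return fib_list
-- ===== SOURCE B (Python) =====
-- def create_fibonacci_list(number: int):
--     # Iterative: track the previous two Fibonacci values instead of recomputing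
--     # each fibonacci(i) by naive exponential recursion.
--     fib_list = [0, 1]
--     prev, cur = 0, 1
--     i = 2
--     while i < number:
--         prev, cur = cur, prev + cur
--         fib_list.append(cur)
--         if cur >= number:
--             break
--         i += 1
--     return fib_list
-- ===== Notes on version B (the rewrite author's own statement) =====
-- stated objective: faster
-- what changed: Replaces per-index naive exponential-recursion fibonacci(i) calls (each value computed twice per iteration) with a single iterative loop carrying the previous two Fibonacci values.
import Mathlib
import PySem

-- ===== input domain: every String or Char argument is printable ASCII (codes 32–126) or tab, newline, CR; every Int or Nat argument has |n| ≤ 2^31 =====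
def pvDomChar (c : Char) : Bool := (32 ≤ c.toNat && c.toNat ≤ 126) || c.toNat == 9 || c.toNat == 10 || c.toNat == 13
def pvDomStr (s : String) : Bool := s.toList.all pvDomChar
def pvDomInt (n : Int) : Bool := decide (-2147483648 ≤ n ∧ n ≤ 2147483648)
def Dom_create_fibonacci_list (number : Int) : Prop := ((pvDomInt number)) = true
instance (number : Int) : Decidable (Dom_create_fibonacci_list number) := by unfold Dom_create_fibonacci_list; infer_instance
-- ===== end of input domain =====

-- B replaces A's per-index exponential recursion with one iterative pass carrying the previous two Fibonacci values (faster).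

-- ===== PORT A =====
-- A's recursive fibonacci; defined by structural recursion on Nat and wrapped for Int.
-- Exact for number ≥ 0; create_fibonacci_list only calls it with i ≥ 2.
def fibonacciNat : Nat → Int
  | 0 => 0
  | 1 => 1
  | n+2 => fibonacciNat (n+1) + fibonacciNat n

def fibonacci (number : Int) : Int := fibonacciNat number.toNat

-- A's for-loop over range(2, number) with its break, as structural recursion on the range list.
def fibLoopA (number : Int) : List Int → List Int → List Int
  | [], fib_list => fib_list
  | i :: rest, fib_list =>
    let num := fibonacci i
    let fib_list := fib_list ++ [fibonacci i]
    if num ≥ number then fib_list else fibLoopA number rest fib_list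

def create_fibonacci_list (number : Int) : List Int :=
  fibLoopA number (PySem.List.pyRange 2 number 1) [0, 1]

-- ===== PORT B =====
-- B's while-loop: prev/cur are the previous two Fibonacci values; terminates since number - i decreases.
def fibLoopB (number : Int) (prev cur : Int) (i : Int) (fib_list : List Int) : List Int :=
  if _h : i < number then
    let prev' := cur
    let cur' := prev + cur
    let fib_list := fib_list ++ [cur']
    if cur' ≥ number then fib_list else fibLoopB number prev' cur' (i+1) fib_list
  else fib_list
termination_by (number - i).toNat
decreasing_by omega

def create_fibonacci_list_alt (number : Int) : List Int :=
  fibLoopB number 0 1 2 [0, 1]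

-- ===== PRECONDITION & SPEC =====
def Spec_create_fibonacci_list (number : Int) (out : List Int) : Prop := out = create_fibonacci_list_alt number
instance (number : Int) (out : List Int) : Decidable (Spec_create_fibonacci_list number out) := by unfold Spec_create_fibonacci_list; infer_instance

-- ===== CLAIM (what is proved, stated in full; the proofs are below) =====
def Claim_equal_create_fibonacci_list : Prop := ∀ (number : Int), Dom_create_fibonacci_list number → Spec_create_fibonacci_list number (create_fibonacci_list number)

-- ===== LEMMAS AND PROOFS =====

-- Fibonacci recurrence read off at an Int index i ≥ 2.
lemma fibonacci_step (i : Int) (h : 2 ≤ i) :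
    fibonacci i = fibonacci (i - 1) + fibonacci (i - 2) := by
  have h2 : i.toNat = (i - 2).toNat + 2 := by omega
  have h1 : (i - 1).toNat = (i - 2).toNat + 1 := by omega
  simp [fibonacci, h2, h1, fibonacciNat]

-- Loop correspondence: at loop head with counter i ≥ 2, B carries fib(i-2), fib(i-1)
-- while A still has to process the range [i, …, number-1].
lemma loop_eq (number : Int) : ∀ (k : Nat) (i : Int) (acc : List Int), 2 ≤ i →
    (number - i).toNat = k →
    fibLoopA number (PySem.List.pyRange i number 1) acc
      = fibLoopB number (fibonacci (i - 2)) (fibonacci (i - 1)) i acc := by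
  intro k
  induction k with
  | zero =>
    intro i acc h2 hk
    have hge : ¬ i < number := by omega
    rw [fibLoopB]
    simp [PySem.List.pyRange, hge, fibLoopA]
  | succ n ih =>
    intro i acc h2 hk
    have hlt : i < number := by omega
    rw [PySem.List.pyRange_one_cons hlt, fibLoopB]
    have hcur : fibonacci (i - 2) + fibonacci (i - 1) = fibonacci i := by
      rw [fibonacci_step i h2]; ring
    simp only [fibLoopA, hlt, dif_pos, hcur]
    by_cases hbr : fibonacci i ≥ number
    · simp [hbr]
    · simp only [hbr, if_neg, not_false_iff]
      have := ih (i + 1) (acc ++ [fibonacci i]) (by omega) (by omega)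
      simpa [show i + 1 - 2 = i - 1 by omega] using this

-- ===== VERDICT (by name: the statement is the Claim_ definition above) =====
theorem create_fibonacci_list_spec : Claim_equal_create_fibonacci_list := by
  intro number _
  unfold Spec_create_fibonacci_list create_fibonacci_list create_fibonacci_list_alt
  have := loop_eq number (number - 2).toNat 2 [0, 1] (by omega) rfl
  simpa [fibonacci, fibonacciNat] using this
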